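-- pv_equiv track=rewrite | github.com/mindsuru/Laser_Sound_Simulation | blenderJsonImportv3.py | filter_points
-- ===== SOURCE A (Python) =====
-- def filter_points(points):
--     # Check if the list is empty or has only one element
--     if not points or len(points) == 1:
--         return points
--
--     # Initialize the filtered list with the first point
--     filtered_points = [points[0]]
--
--     # Iterate over the points starting from the second one
--     for current_point in points[1:]:
--         # Compare the x-value of the current point with the x-value of the last point in the filtered list
--         if current_point[0] != filtered_points[-1][0]:
--             filtered_points.append(current_point)
--
--     return filtered_points
-- ===== SOURCE B (Python) =====
-- def filter_points(points):
--     # Keep the first point, then keep each point whose x differs from its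
--     # immediate predecessor in the original list (equivalent to comparing with
--     # the last kept point, since dropped points share the last kept x-value).
--     return points[:1] + [cur for prev, cur in zip(points, points[1:]) if cur[0] != prev[0]]
-- ===== Notes on version B (the rewrite author's own statement) =====
-- stated objective: simpler
-- what changed: Replaces the guarded accumulator loop that compares each point with the last kept point by a one-line zip of the list with its own tail, keeping a point when its x differs from its immediate predecessor's x (equal by the run-structure of consecutive duplicates).
import Mathlib
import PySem

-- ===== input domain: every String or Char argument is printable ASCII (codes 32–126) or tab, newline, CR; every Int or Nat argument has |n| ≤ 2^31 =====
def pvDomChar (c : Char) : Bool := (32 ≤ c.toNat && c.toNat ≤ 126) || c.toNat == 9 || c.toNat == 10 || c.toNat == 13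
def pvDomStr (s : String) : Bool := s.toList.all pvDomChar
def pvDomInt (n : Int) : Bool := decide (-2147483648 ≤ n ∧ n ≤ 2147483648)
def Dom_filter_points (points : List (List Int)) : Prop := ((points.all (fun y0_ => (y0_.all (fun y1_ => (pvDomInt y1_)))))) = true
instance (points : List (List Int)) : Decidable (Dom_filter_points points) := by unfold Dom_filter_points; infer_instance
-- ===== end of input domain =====

-- B replaces A's accumulator loop (compare with last kept point) by a one-line zip of the
-- list with its tail, keeping a point whose x differs from its predecessor's x: simpler.


-- ===== PORT A =====
def filter_points (points : List (List Int)) : List (List Int) :=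
  if points = [] ∨ points.length = 1 then points
  else
    (PySem.List.slice points (some 1) none).foldl
      (fun filtered current_point =>
        if PySem.List.pyGet? current_point 0 ≠
            PySem.List.pyGet? ((PySem.List.pyGet? filtered (-1)).getD []) 0
        then filtered ++ [current_point] else filtered)
      [(PySem.List.pyGet? points 0).getD []]

-- ===== PORT B =====
def filter_points_alt (points : List (List Int)) : List (List Int) :=
  PySem.List.slice points none (some 1) ++
    ((points.zip (PySem.List.slice points (some 1) none)).filterMap
      (fun pc => if PySem.List.pyGet? pc.2 0 ≠ PySem.List.pyGet? pc.1 0 then some pc.2 else none))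

-- ===== PRECONDITION & SPEC =====
-- Pre_ excludes exactly the inputs on which the Python A raises IndexError (a point with no
-- coordinates in a list of length ≥ 2); B raises there too.
def Pre_filter_points (points : List (List Int)) : Prop :=
  points.length ≤ 1 ∨ ∀ p ∈ points, p ≠ []
instance (points : List (List Int)) : Decidable (Pre_filter_points points) := by unfold Pre_filter_points; infer_instance
def pvWitness_filter_points : List (List Int) := [[1, 5], [1, 6], [2, 7], [2, 8], [3, 9]]
def Spec_filter_points (points : List (List Int)) (out : List (List Int)) : Prop := out = filter_points_alt points
instance (points : List (List Int)) (out : List (List Int)) : Decidable (Spec_filter_points points out) := by unfold Spec_filter_points; infer_instance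

-- ===== CLAIM (what is proved, stated in full; the proofs are below) =====
def Claim_equal_filter_points : Prop := ∀ (points : List (List Int)), Dom_filter_points points → Pre_filter_points points → Spec_filter_points points (filter_points points)

-- ===== LEMMAS AND PROOFS =====

-- keyed destutter: the common normal form of the two ports' tails
def pvDestutter (x : Option Int) : List (List Int) → List (List Int)
  | [] => []
  | p :: t => if PySem.List.pyGet? p 0 ≠ x then p :: pvDestutter (PySem.List.pyGet? p 0) t
              else pvDestutter x t

theorem pvFoldl_eq_destutter (l : List (List Int)) :
    ∀ (r : List (List Int)) (a : List Int),
      l.foldl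
        (fun filtered current_point =>
          if PySem.List.pyGet? current_point 0 ≠
              PySem.List.pyGet? ((PySem.List.pyGet? filtered (-1)).getD []) 0
          then filtered ++ [current_point] else filtered)
        (r ++ [a]) = (r ++ [a]) ++ pvDestutter (PySem.List.pyGet? a 0) l := by
  induction l with
  | nil => intro r a; simp [pvDestutter]
  | cons p t ih =>
    intro r a
    simp only [List.foldl_cons, PySem.List.pyGet?_neg_one_append_singleton, Option.getD_some]
    by_cases h : PySem.List.pyGet? p 0 = PySem.List.pyGet? a 0
    · simpa [pvDestutter, h] using ih r a
    · simpa [pvDestutter, h, List.append_assoc] using ih (r ++ [a]) p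

theorem pvZip_eq_destutter (t : List (List Int)) :
    ∀ (a : List Int),
      ((a :: t).zip t).filterMap
        (fun pc => if PySem.List.pyGet? pc.2 0 ≠ PySem.List.pyGet? pc.1 0 then some pc.2 else none)
      = pvDestutter (PySem.List.pyGet? a 0) t := by
  induction t with
  | nil => intro a; simp [pvDestutter]
  | cons p t' ih =>
    intro a
    simp only [List.zip_cons_cons, List.filterMap_cons]
    by_cases h : PySem.List.pyGet? p 0 = PySem.List.pyGet? a 0
    · simp only [pvDestutter, h]
      simp only [ne_eq, not_true_eq_false, if_false]
      simpa [h] using ih p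
    · simp only [pvDestutter]
      simp only [ne_eq]
      simpa [h] using ih p

-- ===== VERDICT (by name: the statement is the Claim_ definition above) =====
theorem filter_points_spec : Claim_equal_filter_points := by
  intro points _ _
  unfold Spec_filter_points filter_points filter_points_alt
  have hto : ∀ xs : List (List Int), PySem.List.slice xs none (some 1) = xs.take 1 := by
    intro xs
    rw [PySem.List.slice_to]
    · norm_num
    · norm_num
  match points with
  | [] => simp [hto]
  | [h] => simp [hto, PySem.List.slice_from_one]
  | h :: p :: t =>
    simp only [hto, PySem.List.slice_from_one, List.tail_cons,
      PySem.List.pyGet?_zero_cons, Option.getD_some]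
    have hne : ¬(h :: p :: t = [] ∨ (h :: p :: t).length = 1) := by simp
    rw [if_neg hne]
    have := pvFoldl_eq_destutter (p :: t) [] h
    simp only [List.nil_append] at this
    rw [this, pvZip_eq_destutter (p :: t) h]
    simp
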